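-- pv_equiv track=rewrite | github.com/leowucn/sincity | sync_anki_v2/utils.py | merge_and_filter
-- ===== SOURCE A (Python) =====
-- def merge_and_filter(dict1, dict2):
--     """
--     返回不包含同时存在于dict1和dict2相同key:value的字典
--     """
--     d = dict1.copy()
--     for key, value in d.items():
--         if key in dict2 and dict2[key] == value:
--             del dict1[key]
--             del dict2[key]
--
--     dict1.update(dict2)
--     return dict1
-- ===== SOURCE B (Python) =====
-- def merge_and_filter(dict1, dict2):
--     # Build the merged dict from scratch without deleting anything:
--     # keep each dict1 pair unless dict2 holds the identical pair, then
--     # overlay each dict2 pair unless dict1 holds the identical pair.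
--     # (Return value only: B does not mutate its arguments.)
--     merged = {}
--     for k, v in dict1.items():
--         if dict2.get(k) != v:
--             merged[k] = v
--     for k, v in dict2.items():
--         if dict1.get(k) != v:
--             merged[k] = v
--     return merged
-- ===== Notes on version B (the rewrite author's own statement) =====
-- stated objective: alternative
-- what changed: A deletes shared-identical pairs from both input dicts in place and then merges dict2 into dict1; B never deletes or mutates anything: it builds a fresh result dict in two filtered insertion passes (dict1 pairs not identically present in dict2, then dict2 pairs not identically present in dict1). Return value only: A mutates both arguments, B mutates neither. Pre_ excludes association lists with duplicate keys, which do not encode a Python dict.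
import Mathlib
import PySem

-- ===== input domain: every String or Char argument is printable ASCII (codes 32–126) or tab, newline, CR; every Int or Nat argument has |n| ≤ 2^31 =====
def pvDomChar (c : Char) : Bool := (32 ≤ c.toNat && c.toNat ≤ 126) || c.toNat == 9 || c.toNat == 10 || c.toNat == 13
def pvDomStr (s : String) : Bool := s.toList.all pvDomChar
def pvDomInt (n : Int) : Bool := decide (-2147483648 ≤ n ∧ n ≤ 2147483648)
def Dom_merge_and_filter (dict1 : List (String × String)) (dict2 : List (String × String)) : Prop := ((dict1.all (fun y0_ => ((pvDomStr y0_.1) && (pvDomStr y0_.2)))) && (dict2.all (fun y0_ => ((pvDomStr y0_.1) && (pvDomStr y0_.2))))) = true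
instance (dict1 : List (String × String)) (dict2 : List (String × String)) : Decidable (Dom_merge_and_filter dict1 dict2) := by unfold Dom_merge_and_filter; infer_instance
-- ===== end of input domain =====

-- B builds a fresh merged dict by two filtered insertion passes (no deletion, no mutation)
-- instead of A's delete-from-both-then-update; equivalence is about the RETURN value only
-- (A mutates both arguments, B mutates neither).

-- ===== PORT A =====
-- the body of A's `for key, value in d.items(): if key in dict2 and dict2[key] == value: del dict1[key]; del dict2[key]`
def mfStepA (st : PySem.Dict String String × PySem.Dict String String) (kv : String × String) :
    PySem.Dict String String × PySem.Dict String String :=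
  if st.2.contains kv.1 && (st.2.get? kv.1 == some kv.2) then (st.1.erase kv.1, st.2.erase kv.1) else st

def merge_and_filter (dict1 : List (String × String)) (dict2 : List (String × String)) : List (String × String) :=
  -- d = dict1.copy(); the loop mutates (dict1, dict2) while iterating over d
  let d := dict1
  let st := d.foldl mfStepA (PySem.Dict.mk dict1, PySem.Dict.mk dict2)
  -- dict1.update(dict2); return dict1
  (st.1.update st.2.items).items

-- ===== PORT B =====
def merge_and_filter_alt (dict1 : List (String × String)) (dict2 : List (String × String)) : List (String × String) :=
  let d1 := PySem.Dict.mk dict1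
  let d2 := PySem.Dict.mk dict2
  -- merged = {}; for k, v in dict1.items(): if dict2.get(k) != v: merged[k] = v
  let m0 := dict1.foldl (fun m kv => if d2.get? kv.1 == some kv.2 then m else m.insert kv.1 kv.2)
              (PySem.Dict.empty)
  -- for k, v in dict2.items(): if dict1.get(k) != v: merged[k] = v
  let m := dict2.foldl (fun m kv => if d1.get? kv.1 == some kv.2 then m else m.insert kv.1 kv.2) m0
  -- return merged
  m.items

-- ===== PRECONDITION & SPEC =====
-- Pre_ excludes association lists with duplicate keys: those are not a faithful encoding of a
-- Python dict (dict construction collapses duplicates), so neither port's behaviour there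
-- corresponds to the Python programs, which only ever see genuine dicts.
def Pre_merge_and_filter (dict1 : List (String × String)) (dict2 : List (String × String)) : Prop :=
  (dict1.map Prod.fst).Nodup ∧ (dict2.map Prod.fst).Nodup
instance (dict1 : List (String × String)) (dict2 : List (String × String)) : Decidable (Pre_merge_and_filter dict1 dict2) := by unfold Pre_merge_and_filter; infer_instance

def pvWitness_merge_and_filter : (List (String × String)) × (List (String × String)) :=
  ([("a", "1"), ("b", "2"), ("c", "3")], [("b", "2"), ("c", "9"), ("d", "4")])

def Spec_merge_and_filter (dict1 : List (String × String)) (dict2 : List (String × String)) (out : List (String × String)) : Prop := out = merge_and_filter_alt dict1 dict2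
instance (dict1 : List (String × String)) (dict2 : List (String × String)) (out : List (String × String)) : Decidable (Spec_merge_and_filter dict1 dict2 out) := by unfold Spec_merge_and_filter; infer_instance

-- ===== CLAIM (what is proved, stated in full; the proofs are below) =====
def Claim_equal_merge_and_filter : Prop := ∀ (dict1 : List (String × String)) (dict2 : List (String × String)), Dom_merge_and_filter dict1 dict2 → Pre_merge_and_filter dict1 dict2 → Spec_merge_and_filter dict1 dict2 (merge_and_filter dict1 dict2)

-- ===== LEMMAS AND PROOFS =====

theorem mf_get?_erase_of_ne (d : PySem.Dict String String) (k k' : String) (h : k' ≠ k) :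
    (d.erase k).get? k' = d.get? k' := by
  obtain ⟨l⟩ := d
  simp only [PySem.Dict.erase, PySem.Dict.get?]
  induction l with
  | nil => rfl
  | cons p t ih =>
    rw [List.filter_cons]
    by_cases hpk : p.1 = k
    · rw [if_neg (by simp [hpk]), List.find?_cons_of_neg (by simp [hpk, Ne.symm h])]
      exact ih
    · rw [if_pos (by simp [hpk])]
      by_cases hpk' : p.1 = k'
      · rw [List.find?_cons_of_pos (by simp [hpk']), List.find?_cons_of_pos (by simp [hpk'])]
      · rw [List.find?_cons_of_neg (by simp [hpk']), List.find?_cons_of_neg (by simp [hpk'])]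
        exact ih

-- A's interleaved delete loop splits into two erase folds over the precomputed key list,
-- as long as the iterated keys are distinct and s2 still agrees with d2 on them.
theorem mf_loop_split (l : List (String × String)) (d2 s1 s2 : PySem.Dict String String)
    (hnd : (l.map Prod.fst).Nodup)
    (hag : ∀ kv ∈ l, s2.get? kv.1 = d2.get? kv.1) :
    l.foldl mfStepA (s1, s2) =
      (((l.filter (fun kv => d2.get? kv.1 == some kv.2)).map Prod.fst).foldl (fun d k => d.erase k) s1,
       ((l.filter (fun kv => d2.get? kv.1 == some kv.2)).map Prod.fst).foldl (fun d k => d.erase k) s2) := by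
  induction l generalizing s1 s2 with
  | nil => rfl
  | cons kv t ih =>
    have hk : s2.get? kv.1 = d2.get? kv.1 := hag kv (List.mem_cons_self ..)
    have hnd' : (t.map Prod.fst).Nodup := (List.nodup_cons.mp hnd).2
    have hknot : kv.1 ∉ t.map Prod.fst := (List.nodup_cons.mp hnd).1
    by_cases hc : d2.get? kv.1 = some kv.2
    · have hcontains : s2.contains kv.1 = true := by
        rcases h : s2.get? kv.1 with _ | w
        · rw [hk, hc] at h; cases h
        · cases hcb : s2.contains kv.1
          · rw [(PySem.Dict.get?_eq_none_iff_contains s2 kv.1).mpr hcb] at h; cases h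
          · rfl
      have hstep : mfStepA (s1, s2) kv = (s1.erase kv.1, s2.erase kv.1) := by
        simp [mfStepA, hcontains, hk, hc]
      have hag' : ∀ p ∈ t, (s2.erase kv.1).get? p.1 = d2.get? p.1 := by
        intro p hp
        have hne : p.1 ≠ kv.1 := by
          intro he; exact hknot (he ▸ List.mem_map_of_mem hp)
        rw [mf_get?_erase_of_ne _ _ _ hne]; exact hag p (List.mem_cons_of_mem _ hp)
      simp only [List.foldl_cons, hstep, List.filter_cons, hc, BEq.rfl, if_pos, List.map_cons]
      exact ih (s1.erase kv.1) (s2.erase kv.1) hnd' hag'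
    · have hstep : mfStepA (s1, s2) kv = (s1, s2) := by
        by_cases hcb : s2.contains kv.1 = true
        · simp [mfStepA, hcb, hk, hc]
        · simp [mfStepA, Bool.of_not_eq_true hcb]
      have hfil : (d2.get? kv.1 == some kv.2) = false := by
        simpa using hc
      simp only [List.foldl_cons, hstep, List.filter_cons, hfil, Bool.false_eq_true, if_false]
      exact ih s1 s2 hnd' (fun p hp => hag p (List.mem_cons_of_mem _ hp))

-- a fold of erases is one filter
theorem mf_erase_fold (C : List String) (l : List (String × String)) :
    C.foldl (fun d k => d.erase k) (PySem.Dict.mk l)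
      = PySem.Dict.mk (l.filter (fun p => !C.contains p.1)) := by
  induction C generalizing l with
  | nil => simp
  | cons c C ih =>
    simp only [List.foldl_cons]
    have : (PySem.Dict.mk l).erase c = PySem.Dict.mk (l.filter (fun p => !(p.1 == c))) := rfl
    rw [this, ih, List.filter_filter]
    congr 1
    apply List.filter_congr
    intro p _
    simp [beq_eq_decide, Bool.and_comm]

-- a fold of guarded inserts is a fold of inserts over the filtered list
theorem mf_guarded_fold (l : List (String × String)) (cond : String × String → Bool)
    (m : PySem.Dict String String) :
    l.foldl (fun m kv => if cond kv then m else m.insert kv.1 kv.2) m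
      = (l.filter (fun kv => !cond kv)).foldl (fun m kv => m.insert kv.1 kv.2) m := by
  induction l generalizing m with
  | nil => rfl
  | cons kv t ih =>
    simp only [List.foldl_cons, List.filter_cons]
    by_cases hc : cond kv
    · simp [hc, ih]
    · simp [hc, ih]

-- two pairs of a key-nodup association list with the same key are the same pair
theorem mf_eq_of_mem_nodup (l : List (String × String)) (hnd : (l.map Prod.fst).Nodup)
    (p q : String × String) (hp : p ∈ l) (hq : q ∈ l) (hk : p.1 = q.1) : p = q := by
  have h1 : (PySem.Dict.mk l).get? p.1 = some p.2 :=
    PySem.Dict.get?_of_mem_items (PySem.Dict.mk l) (by simpa using hp) (by simpa [PySem.Dict.keys] using hnd)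
  have h2 : (PySem.Dict.mk l).get? q.1 = some q.2 :=
    PySem.Dict.get?_of_mem_items (PySem.Dict.mk l) (by simpa using hq) (by simpa [PySem.Dict.keys] using hnd)
  rw [← hk] at h2; rw [h1] at h2
  exact Prod.ext hk (by injection h2)

-- ===== VERDICT (by name: the statement is the Claim_ definition above) =====
theorem merge_and_filter_spec : Claim_equal_merge_and_filter := by
  intro dict1 dict2 _ hpre
  unfold Spec_merge_and_filter
  simp only [merge_and_filter, merge_and_filter_alt]
  rw [mf_loop_split dict1 (PySem.Dict.mk dict2) (PySem.Dict.mk dict1) (PySem.Dict.mk dict2)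
        hpre.1 (fun _ _ => rfl)]
  rw [mf_erase_fold, mf_erase_fold, mf_guarded_fold, mf_guarded_fold]
  set C := (dict1.filter (fun kv => (PySem.Dict.mk dict2).get? kv.1 == some kv.2)).map Prod.fst with hC
  -- membership in C characterised by the two dict lookups
  have hmemC : ∀ x, x ∈ C ↔ ∃ q ∈ dict1, q.1 = x ∧ (PySem.Dict.mk dict2).get? q.1 = some q.2 := by
    intro x
    simp only [hC, List.mem_map, List.mem_filter, beq_iff_eq]
    constructor
    · rintro ⟨q, ⟨hq, hg⟩, hx⟩; exact ⟨q, hq, hx, hg⟩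
    · rintro ⟨q, hq, hx, hg⟩; exact ⟨q, ⟨hq, hg⟩, hx⟩
  -- first pass: dropped dict1 pairs are exactly those dict2 holds identically
  have hf1 : dict1.filter (fun p => !C.contains p.1)
      = dict1.filter (fun kv => !((PySem.Dict.mk dict2).get? kv.1 == some kv.2)) := by
    apply List.filter_congr
    intro p hp
    congr 1
    rw [Bool.eq_iff_iff, List.contains_iff_mem, beq_iff_eq, hmemC]
    constructor
    · rintro ⟨q, hq, hk, hg⟩
      have := mf_eq_of_mem_nodup dict1 hpre.1 q p hq hp hk
      rwa [this] at hg
    · intro hg; exact ⟨p, hp, rfl, hg⟩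
  -- second pass: dropped dict2 pairs are exactly those dict1 holds identically
  have hf2 : dict2.filter (fun p => !C.contains p.1)
      = dict2.filter (fun kv => !((PySem.Dict.mk dict1).get? kv.1 == some kv.2)) := by
    apply List.filter_congr
    intro p hp
    congr 1
    rw [Bool.eq_iff_iff, List.contains_iff_mem, beq_iff_eq, hmemC]
    have hp2 : (PySem.Dict.mk dict2).get? p.1 = some p.2 :=
      PySem.Dict.get?_of_mem_items (PySem.Dict.mk dict2) (by simpa using hp) (by simpa [PySem.Dict.keys] using hpre.2)
    constructor
    · rintro ⟨q, hq, hk, hg⟩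
      rw [hk, hp2] at hg
      injection hg with hv
      have : q = p := Prod.ext hk hv.symm
      rw [this] at hq
      exact PySem.Dict.get?_of_mem_items (PySem.Dict.mk dict1) (by simpa using hq) (by simpa [PySem.Dict.keys] using hpre.1)
    · intro hg
      exact ⟨p, by simpa using PySem.Dict.mem_items_of_get?_eq_some (PySem.Dict.mk dict1) hg, rfl, hp2⟩
  rw [hf1, hf2]
  -- B's first pass over fresh distinct keys from the empty dict is just the filtered list
  have hl1nd : ((dict1.filter (fun kv => !((PySem.Dict.mk dict2).get? kv.1 == some kv.2))).map Prod.fst).Nodup :=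
    List.Nodup.sublist (List.Sublist.map Prod.fst List.filter_sublist) hpre.1
  have hm0 : (dict1.filter (fun kv => !((PySem.Dict.mk dict2).get? kv.1 == some kv.2))).foldl
        (fun m kv => m.insert kv.1 kv.2) PySem.Dict.empty
      = PySem.Dict.mk (dict1.filter (fun kv => !((PySem.Dict.mk dict2).get? kv.1 == some kv.2))) := by
    apply PySem.Dict.ext
    rw [PySem.Dict.items_foldl_insert_fresh _ Prod.fst Prod.snd PySem.Dict.empty
          (fun _ _ => PySem.Dict.contains_empty _) hl1nd]
    simp [PySem.Dict.empty]
  rw [hm0]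
  rfl
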